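-- pv_equiv track=rewrite | github.com/981377660LMT/algorithm-study | 19_数学/多项式/生成函数/verify/1155. 掷骰子的N种方法-前缀和优化dp.py | groupKnapsackCount
-- ===== SOURCE A (Python) =====
-- from itertools import accumulate
-- from typing import List
--
-- def min2(a: int, b: int) -> int:
--     return a if a < b else b
--
-- def groupKnapsackCount(count: List[int], k: int, mod=int(1e9 + 7)) -> List[int]:
--     """分组背包求方案数.
--     每个物品有count[i]个, 求选择k个物品的方案数.
--     """
--     n = len(count)
--     dp = [0] * (k + 1)
--     dp[0] = 1
--     for i in range(n):
--         ndp = [0] * (k + 1)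
--         dpPresum = [0] + list(accumulate(dp))
--         for j in range(k + 1):
--             upper = min2(j + 1, count[i])
--             ndp[j] = (dpPresum[j + 1] - dpPresum[j + 1 - upper]) % mod
--         dp = ndp
--     return dp
-- ===== SOURCE B (Python) =====
-- def groupKnapsackCount(count, k, mod=int(1e9 + 7)):
--     """分组背包求方案数 — generating functions: numerator prod (1 - x^c) then divide by (1-x)^n."""
--     p = [0] * (k + 1)
--     p[0] = 1
--     # multiply the sparse numerator factors (1 - x^c), truncated at degree k
--     for c in count:
--         p = [(p[j] - p[j - c]) % mod if j >= c else p[j] for j in range(k + 1)]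
--     # divide by (1 - x)^len(count): one cumulative-sum pass per factor
--     for _ in range(len(count)):
--         s = 0
--         for j in range(k + 1):
--             s = (s + p[j]) % mod
--             p[j] = s
--     return p
-- ===== Notes on version B (the rewrite author's own statement) =====
-- stated objective: alternative
-- what changed: B computes the answer by generating functions: it multiplies out the sparse numerator prod_i (1 - x^{count[i]}) with one two-branch pass per factor, then divides by (1-x)^n via n cumulative-sum passes, instead of A's per-group prefix-sum window DP; same O(n*k) cost, different algorithm.
import Mathlib
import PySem

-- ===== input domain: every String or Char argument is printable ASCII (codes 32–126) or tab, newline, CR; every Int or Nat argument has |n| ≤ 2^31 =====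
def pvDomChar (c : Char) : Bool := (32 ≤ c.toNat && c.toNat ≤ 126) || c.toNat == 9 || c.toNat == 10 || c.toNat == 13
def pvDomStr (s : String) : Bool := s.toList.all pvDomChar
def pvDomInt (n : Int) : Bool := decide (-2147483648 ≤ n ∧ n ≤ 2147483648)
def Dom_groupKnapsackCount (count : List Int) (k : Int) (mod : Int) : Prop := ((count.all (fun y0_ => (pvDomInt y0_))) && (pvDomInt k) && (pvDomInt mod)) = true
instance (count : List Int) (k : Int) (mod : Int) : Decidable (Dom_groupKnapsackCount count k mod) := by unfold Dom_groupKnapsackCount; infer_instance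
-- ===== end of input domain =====

-- B computes the answer by generating functions: multiply the sparse numerator factors
-- (1 - x^c) and then divide by (1 - x)^n via n cumulative-sum passes, instead of A's
-- per-group prefix-sum window DP; objective: alternative (same O(n*k) cost, different algorithm).

-- ===== PORT A =====
def min2 (a b : Int) : Int := if a < b then a else b

def groupKnapsackCount (count : List Int) (k : Int) (mod : Int) : List Int :=
  -- dp = [0]*(k+1); dp[0] = 1   ([0]*(k+1) is [] for k+1 ≤ 0; dp[0]=1 then raises — excluded by Pre_)
  -- dpPresum = [0] + list(accumulate(dp)) is exactly List.scanl (·+·) 0 dp;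
  -- ndp[j] = (dpPresum[j+1] - dpPresum[j+1-upper]) % mod with upper = min2(j+1, count[i])
  count.foldl (fun dp c =>
    (PySem.List.pyRange 0 (k + 1) 1).map (fun j =>
      PySem.Int.mod (PySem.List.pyGetD (dp.scanl (· + ·) 0) (j + 1) 0
        - PySem.List.pyGetD (dp.scanl (· + ·) 0) (j + 1 - min2 (j + 1) c) 0) mod))
    ((List.replicate (k + 1).toNat 0).set 0 1)

-- ===== PORT B =====
-- s = 0; for j in range(k+1): s = (s + p[j]) % mod; p[j] = s   (one cumulative-sum pass)
def cumPass (mod k : Int) (p : List Int) : List Int :=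
  ((PySem.List.pyRange 0 (k + 1) 1).foldl (fun (st : Int × List Int) j =>
      let s := PySem.Int.mod (st.1 + PySem.List.pyGetD p j 0) mod
      (s, st.2 ++ [s])) (0, ([] : List Int))).2

-- for _ in range(n): one cumulative-sum pass
def cumIter (mod k : Int) : Nat → List Int → List Int
  | 0, p => p
  | n + 1, p => cumIter mod k n (cumPass mod k p)

def groupKnapsackCount_alt (count : List Int) (k : Int) (mod : Int) : List Int :=
  -- numerator: p = [(p[j] - p[j-c]) % mod if j >= c else p[j] for j in range(k+1)] per factor,
  -- then len(count) cumulative-sum passes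
  cumIter mod k count.length
    (count.foldl (fun p c =>
      (PySem.List.pyRange 0 (k + 1) 1).map (fun j =>
        if c ≤ j then
          PySem.Int.mod (PySem.List.pyGetD p j 0 - PySem.List.pyGetD p (j - c) 0) mod
        else PySem.List.pyGetD p j 0))
      ((List.replicate (k + 1).toNat 0).set 0 1))

-- ===== PRECONDITION & SPEC =====
-- Pre_ excludes exactly the inputs on which A raises: k < 0 (dp[0]=1 on an empty list, IndexError),
-- mod = 0 with a nonempty count (ZeroDivisionError), and a negative group count (dpPresum IndexError).
def Pre_groupKnapsackCount (count : List Int) (k : Int) (mod : Int) : Prop :=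
  0 ≤ k ∧ (count = [] ∨ (mod ≠ 0 ∧ ∀ c ∈ count, 0 ≤ c))
instance (count : List Int) (k : Int) (mod : Int) : Decidable (Pre_groupKnapsackCount count k mod) := by unfold Pre_groupKnapsackCount; infer_instance
def pvWitness_groupKnapsackCount : List Int × Int × Int := ([2, 1], 3, 7)

def Spec_groupKnapsackCount (count : List Int) (k : Int) (mod : Int) (out : List Int) : Prop := out = groupKnapsackCount_alt count k mod
instance (count : List Int) (k : Int) (mod : Int) (out : List Int) : Decidable (Spec_groupKnapsackCount count k mod out) := by unfold Spec_groupKnapsackCount; infer_instance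

-- ===== CLAIM (what is proved, stated in full; the proofs are below) =====
def Claim_equal_groupKnapsackCount : Prop := ∀ (count : List Int) (k : Int) (mod : Int), Dom_groupKnapsackCount count k mod → Pre_groupKnapsackCount count k mod → Spec_groupKnapsackCount count k mod (groupKnapsackCount count k mod)

-- ===== LEMMAS AND PROOFS =====

-- ---- the exact (un-reduced) model: coefficient sequences as functions Nat → Int ----

-- initial polynomial 1
def pvE0 : Nat → Int := fun j => if j = 0 then 1 else 0
-- prefix sums = multiplication by 1/(1-x)
def pvCum (g : Nat → Int) : Nat → Int
  | 0 => g 0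
  | j + 1 => pvCum g j + g (j + 1)
-- multiplication by (1 - x^c)
def pvMul (c : Nat) (g : Nat → Int) : Nat → Int :=
  fun j => g j - (if c ≤ j then g (j - c) else 0)

-- A's window operator is Cum ∘ Mul_c (telescoping)
lemma cum_mul (c : Nat) (g : Nat → Int) (j : Nat) :
    pvCum (pvMul c g) j = pvCum g j - (if c ≤ j then pvCum g (j - c) else 0) := by
  induction j with
  | zero => simp [pvCum, pvMul]
  | succ j ih =>
    show pvCum (pvMul c g) j + pvMul c g (j + 1) = _
    rw [ih]
    by_cases h1 : c ≤ j
    · have h2 : c ≤ j + 1 := by omega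
      have h3 : j + 1 - c = (j - c) + 1 := by omega
      simp only [pvMul, pvCum, h1, h2, h3, if_true]
      ring
    · by_cases h2 : c ≤ j + 1
      · have h3 : j + 1 - c = 0 := by omega
        simp only [pvMul, pvCum, h1, h2, h3, if_true, if_false]
        ring
      · simp only [pvMul, pvCum, h1, h2, if_false]
        ring

lemma mul_cum (c : Nat) (g : Nat → Int) :
    pvMul c (pvCum g) = pvCum (pvMul c g) :=
  funext fun j => (cum_mul c g j).symm

-- all the Cum passes can be postponed to the end
lemma foldl_mul_cum (cs : List Int) : ∀ g : Nat → Int,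
    cs.foldl (fun g c => pvMul c.toNat g) (pvCum g)
      = pvCum (cs.foldl (fun g c => pvMul c.toNat g) g) := by
  induction cs with
  | nil => intro g; rfl
  | cons c t ih =>
    intro g
    simp only [List.foldl_cons]
    rw [mul_cum, ih]

lemma exact_identity (cs : List Int) : ∀ g : Nat → Int,
    cs.foldl (fun g c => pvCum (pvMul c.toNat g)) g
      = pvCum^[cs.length] (cs.foldl (fun g c => pvMul c.toNat g) g) := by
  induction cs with
  | nil => intro g; rfl
  | cons c t ih =>
    intro g
    simp only [List.foldl_cons, List.length_cons]
    rw [ih (pvCum (pvMul c.toNat g)), foldl_mul_cum, ← Function.iterate_succ_apply]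

-- ---- floor-mod congruence toolkit ----

lemma pvMod_modEq (a m : Int) : Int.ModEq m (PySem.Int.mod a m) a := by
  unfold PySem.Int.mod
  have : a.fmod m - a = m * (-(a.fdiv m)) := by rw [Int.fmod_def]; ring
  exact Int.ModEq.symm (Int.modEq_iff_dvd.mpr ⟨-(a.fdiv m), by omega⟩)

lemma pvMod_congr (m a b : Int) (h : Int.ModEq m a b) :
    PySem.Int.mod a m = PySem.Int.mod b m := by
  unfold PySem.Int.mod
  rw [Int.fmod_eq_emod, Int.fmod_eq_emod, show a % m = b % m from h]
  have hd : (m ∣ a) ↔ (m ∣ b) := by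
    rw [Int.dvd_iff_emod_eq_zero, Int.dvd_iff_emod_eq_zero, show a % m = b % m from h]
  by_cases h0 : 0 ≤ m
  · simp [h0]
  · simp [h0, hd]

-- Cum and Mul preserve pointwise congruence up to the index they read
lemma cum_modEq (m : Int) (f g : Nat → Int) (j : Nat)
    (h : ∀ t, t ≤ j → Int.ModEq m (f t) (g t)) :
    Int.ModEq m (pvCum f j) (pvCum g j) := by
  induction j with
  | zero => exact h 0 (le_refl 0)
  | succ j ih =>
    exact Int.ModEq.add (ih fun t ht => h t (by omega)) (h (j + 1) (le_refl _))

lemma mul_modEq (m : Int) (c : Nat) (f g : Nat → Int) (j : Nat)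
    (h : ∀ t, t ≤ j → Int.ModEq m (f t) (g t)) :
    Int.ModEq m (pvMul c f j) (pvMul c g j) := by
  unfold pvMul
  refine Int.ModEq.sub (h j (le_refl j)) ?_
  split_ifs with hc
  · exact h (j - c) (by omega)
  · rfl

-- ---- relating lists to the exact model ----

-- "the list is congruent to g entrywise" / "the list is exactly g reduced entrywise"
def pvClose (m : Int) (K : Nat) (p : List Int) (g : Nat → Int) : Prop :=
  p.length = K ∧ ∀ j, j < K → Int.ModEq m (p.getD j 0) (g j)
def pvRed (m : Int) (K : Nat) (p : List Int) (g : Nat → Int) : Prop :=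
  p.length = K ∧ ∀ j, j < K → p.getD j 0 = PySem.Int.mod (g j) m

lemma red_close (m : Int) (K : Nat) (p : List Int) (g : Nat → Int)
    (h : pvRed m K p g) : pvClose m K p g := by
  refine ⟨h.1, fun j hj => ?_⟩
  rw [h.2 j hj]
  exact pvMod_modEq (g j) m

lemma red_unique (m : Int) (K : Nat) (p q : List Int) (g : Nat → Int)
    (hp : pvRed m K p g) (hq : pvRed m K q g) : p = q := by
  apply List.ext_getElem (by rw [hp.1, hq.1])
  intro j hjp hjq
  have hKp := hp.1
  have h1 := hp.2 j (by omega)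
  have h2 := hq.2 j (by omega)
  rw [List.getD_eq_getElem p 0 hjp] at h1
  rw [List.getD_eq_getElem q 0 hjq] at h2
  rw [h1, h2]

-- prefix sums of the list are pvCum of its entries
lemma take_sum_cum (p : List Int) : ∀ j : Nat,
    (p.take (j + 1)).sum = pvCum (fun t => p.getD t 0) j := by
  intro j
  induction j with
  | zero => cases p <;> simp [pvCum]
  | succ j ih =>
    have hstep : pvCum (fun t => p.getD t 0) (j + 1)
        = pvCum (fun t => p.getD t 0) j + p.getD (j + 1) 0 := rfl
    by_cases h : j + 1 < p.length
    · rw [List.sum_take_succ p (j + 1) h, ih, hstep, List.getD_eq_getElem p 0 h]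
    · have h1 : (p.take (j + 2)).sum = p.sum := by rw [List.take_of_length_le (by omega)]
      have h2 : (p.take (j + 1)).sum = p.sum := by rw [List.take_of_length_le (by omega)]
      have h3 : p.getD (j + 1) 0 = 0 := List.getD_eq_default _ _ (by omega)
      rw [h1, hstep, h3, ← ih, h2]
      ring

-- getD of a mapped pyRange row
lemma getD_map_row (f : Int → Int) (k : Int) (j : Nat) (hj : j < (k + 1).toNat) :
    ((PySem.List.pyRange 0 (k + 1) 1).map f).getD j 0 = f (j : Int) := by
  have hlen : ((PySem.List.pyRange 0 (k + 1) 1).map f).length = (k + 1).toNat := by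
    simp [PySem.List.length_pyRange_one]
  rw [List.getD_eq_getElem _ 0 (by omega), List.getElem_map]
  congr 1
  rw [PySem.List.getElem_pyRange_one]
  ring

-- value of the scanl (prefix-sum) array: entry i is init + sum of the first i elements
lemma scanl_getD (dp : List Int) (a : Int) (i : Nat) (hi : i ≤ dp.length) :
    (dp.scanl (· + ·) a).getD i 0 = a + (dp.take i).sum := by
  induction dp generalizing a i with
  | nil =>
    have h0 : i = 0 := Nat.le_zero.mp (by simpa using hi)
    subst h0; simp [List.scanl]
  | cons d t ih =>
    cases i with
    | zero => simp [List.scanl]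
    | succ i' =>
      rw [List.scanl_cons, List.getD_cons_succ, List.take_succ_cons, List.sum_cons,
        ih (a + d) i' (by simpa using hi)]
      ring

-- ---- one step of each phase ----

-- A's row: from a congruent dp it produces the reduced image of Cum (Mul c g)
lemma rowA_red (m k c : Int) (hc : 0 ≤ c) (p : List Int) (g : Nat → Int)
    (h : pvClose m (k + 1).toNat p g) :
    pvRed m (k + 1).toNat
      ((PySem.List.pyRange 0 (k + 1) 1).map (fun j =>
        PySem.Int.mod (PySem.List.pyGetD (p.scanl (· + ·) 0) (j + 1) 0
          - PySem.List.pyGetD (p.scanl (· + ·) 0) (j + 1 - min2 (j + 1) c) 0) m))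
      (pvCum (pvMul c.toNat g)) := by
  obtain ⟨hlen, hcong⟩ := h
  refine ⟨by simp [PySem.List.length_pyRange_one], fun j hj => ?_⟩
  rw [getD_map_row _ k j hj]
  set u : Nat := (min ((j : Int) + 1) c).toNat with hu
  have hucast : (u : Int) = min ((j : Int) + 1) c := Int.toNat_of_nonneg (by omega)
  have humin2 : min2 ((j : Int) + 1) c = (u : Int) := by
    rw [hucast]; unfold min2; rw [min_def]; split_ifs <;> omega
  have hule : u ≤ j + 1 := by omega
  have h1 : (j : Int) + 1 = ((j + 1 : Nat) : Int) := by omega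
  have h2 : (j : Int) + 1 - min2 ((j : Int) + 1) c = ((j + 1 - u : Nat) : Int) := by
    rw [humin2]; push_cast [hule]; omega
  rw [h2, h1, PySem.List.pyGetD_natCast, PySem.List.pyGetD_natCast,
    scanl_getD p 0 (j + 1) (by omega), scanl_getD p 0 (j + 1 - u) (by omega)]
  -- the window difference is Mul_c (Cum pf) j = Cum (Mul_c pf) j
  have hdiff : (0 + (p.take (j + 1)).sum) - (0 + (p.take (j + 1 - u)).sum)
      = pvCum (pvMul c.toNat (fun t => p.getD t 0)) j := by
    rw [cum_mul]
    by_cases hcj : c.toNat ≤ j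
    · have hu2 : j + 1 - u = (j - c.toNat) + 1 := by omega
      rw [hu2, take_sum_cum p j, take_sum_cum p (j - c.toNat), if_pos hcj]
      ring
    · have hu1 : u = j + 1 := by omega
      rw [hu1, Nat.sub_self, List.take_zero, take_sum_cum p j, if_neg hcj,
        List.sum_nil]
      ring
  rw [hdiff]
  exact pvMod_congr m _ _
    (cum_modEq m _ _ j (fun t ht => mul_modEq m c.toNat (fun t => p.getD t 0) g t
      (fun s hs => hcong s (by omega))))

-- B's multiply step: from a congruent p it stays congruent to Mul c g
lemma mulRow_close (m k c : Int) (hc : 0 ≤ c) (p : List Int) (g : Nat → Int)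
    (h : pvClose m (k + 1).toNat p g) :
    pvClose m (k + 1).toNat
      ((PySem.List.pyRange 0 (k + 1) 1).map (fun j =>
        if c ≤ j then
          PySem.Int.mod (PySem.List.pyGetD p j 0 - PySem.List.pyGetD p (j - c) 0) m
        else PySem.List.pyGetD p j 0))
      (pvMul c.toNat g) := by
  obtain ⟨hlen, hcong⟩ := h
  refine ⟨by simp [PySem.List.length_pyRange_one], fun j hj => ?_⟩
  rw [getD_map_row _ k j hj]
  by_cases hcj : c ≤ (j : Int)
  · have hcn : c.toNat ≤ j := by omega
    have hjc : (j : Int) - c = ((j - c.toNat : Nat) : Int) := by push_cast [hcn]; omega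
    rw [if_pos hcj, hjc]
    simp only [PySem.List.pyGetD_natCast]
    have : Int.ModEq m (p.getD j 0 - p.getD (j - c.toNat) 0) (pvMul c.toNat g j) := by
      unfold pvMul
      rw [if_pos hcn]
      exact Int.ModEq.sub (hcong j hj) (hcong (j - c.toNat) (by omega))
    exact ((pvMod_modEq _ m).trans this)
  · have hcn : ¬ c.toNat ≤ j := by omega
    rw [if_neg hcj]
    simp only [PySem.List.pyGetD_natCast]
    unfold pvMul
    rw [if_neg hcn, sub_zero]
    exact hcong j hj
-- (continued below)

-- B's cumulative-sum pass: state of the fold after the first b iterations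
lemma cumPass_state (m : Int) (p : List Int) (g : Nat → Int) (K : Nat)
    (hcong : ∀ j, j < K → Int.ModEq m (p.getD j 0) (g j)) :
    ∀ b : Nat, b ≤ K →
      ((PySem.List.pyRange 0 (b : Int) 1).foldl (fun (st : Int × List Int) j =>
          let s := PySem.Int.mod (st.1 + PySem.List.pyGetD p j 0) m
          (s, st.2 ++ [s])) (0, ([] : List Int))).2.length = b ∧
      (∀ t, t < b →
        ((PySem.List.pyRange 0 (b : Int) 1).foldl (fun (st : Int × List Int) j =>
          let s := PySem.Int.mod (st.1 + PySem.List.pyGetD p j 0) m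
          (s, st.2 ++ [s])) (0, ([] : List Int))).2.getD t 0
          = PySem.Int.mod (pvCum g t) m) ∧
      Int.ModEq m
        ((PySem.List.pyRange 0 (b : Int) 1).foldl (fun (st : Int × List Int) j =>
          let s := PySem.Int.mod (st.1 + PySem.List.pyGetD p j 0) m
          (s, st.2 ++ [s])) (0, ([] : List Int))).1
        (if b = 0 then 0 else pvCum g (b - 1)) := by
  intro b
  induction b with
  | zero =>
    intro _
    refine ⟨by simp [PySem.List.pyRange_one_eq_nil], fun t ht => by omega, by
      simp [PySem.List.pyRange_one_eq_nil]⟩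
  | succ b ih =>
    intro hb
    obtain ⟨ihlen, ihent, ihs⟩ := ih (by omega)
    rw [show ((b + 1 : Nat) : Int) = (b : Int) + 1 by push_cast; ring,
      PySem.List.pyRange_one_succ_right (by positivity)]
    rw [List.foldl_append, List.foldl_cons, List.foldl_nil]
    set st := (PySem.List.pyRange 0 (b : Int) 1).foldl (fun (st : Int × List Int) j =>
        let s := PySem.Int.mod (st.1 + PySem.List.pyGetD p j 0) m
        (s, st.2 ++ [s])) (0, ([] : List Int)) with hst
    have hpb : PySem.List.pyGetD p (b : Int) 0 = p.getD b 0 := by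
      rw [PySem.List.pyGetD_natCast]
    -- the new running value is congruent to pvCum g b
    have hnew : Int.ModEq m (st.1 + PySem.List.pyGetD p (b : Int) 0) (pvCum g b) := by
      rw [hpb]
      cases b with
      | zero =>
        have : pvCum g 0 = 0 + g 0 := by rw [pvCum]; ring
        rw [this]
        exact Int.ModEq.add (by simpa using ihs) (hcong 0 (by omega))
      | succ b' =>
        have : pvCum g (b' + 1) = pvCum g b' + g (b' + 1) := rfl
        rw [this]
        exact Int.ModEq.add (by simpa using ihs) (hcong (b' + 1) (by omega))
    refine ⟨by simp [ihlen], fun t ht => ?_, ?_⟩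
    · by_cases htb : t < b
      · rw [List.getD_append _ _ _ _ (by omega)]
        exact ihent t htb
      · have : t = b := by omega
        subst this
        show (st.2 ++ [_]).getD t 0 = _
        rw [List.getD_eq_getElem _ 0 (by simp only [List.length_append, List.length_cons, List.length_nil, ihlen]; omega),
          List.getElem_append_right (by omega)]
        simp only [ihlen, Nat.sub_self, List.getElem_cons_zero]
        exact pvMod_congr m _ _ hnew
    · show Int.ModEq m (PySem.Int.mod (st.1 + PySem.List.pyGetD p (b : Int) 0) m) _
      rw [if_neg (by omega), show b + 1 - 1 = b by omega]
      exact (pvMod_modEq _ m).trans hnew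

lemma cumPass_red (m k : Int) (p : List Int) (g : Nat → Int)
    (h : pvClose m (k + 1).toNat p g) :
    pvRed m (k + 1).toNat (cumPass m k p) (pvCum g) := by
  obtain ⟨hlen, hcong⟩ := h
  have hcast : (((k + 1).toNat : Nat) : Int) = k + 1 ∨ (k + 1).toNat = 0 := by omega
  have hmain := cumPass_state m p g (k + 1).toNat hcong (k + 1).toNat (le_refl _)
  unfold cumPass
  rcases hcast with hc | hc
  · rw [show PySem.List.pyRange 0 (k + 1) 1
        = PySem.List.pyRange 0 (((k + 1).toNat : Nat) : Int) 1 by rw [hc]]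
    exact ⟨hmain.1, hmain.2.1⟩
  · have hnil : PySem.List.pyRange 0 (k + 1) 1 = [] := by
      apply PySem.List.pyRange_one_eq_nil; omega
    rw [hnil]
    exact ⟨by simp [hc], fun t ht => by omega⟩

lemma cumIter_red (m k : Int) : ∀ (n : Nat) (p : List Int) (g : Nat → Int),
    1 ≤ n → pvClose m (k + 1).toNat p g →
    pvRed m (k + 1).toNat (cumIter m k n p) (pvCum^[n] g) := by
  intro n
  induction n with
  | zero => intro p g h; omega
  | succ n ih =>
    intro p g _ hclose
    rw [show cumIter m k (n + 1) p = cumIter m k n (cumPass m k p) from rfl,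
      Function.iterate_succ_apply]
    cases n with
    | zero => exact cumPass_red m k p g hclose
    | succ n' =>
      exact ih (cumPass m k p) (pvCum g) (by omega)
        (red_close _ _ _ _ (cumPass_red m k p g hclose))

-- A's whole (nonempty) loop produces the reduced image of the exact fold
lemma Aloop_red (m k : Int) : ∀ (cs : List Int), (∀ c ∈ cs, 0 ≤ c) → cs ≠ [] →
    ∀ (p : List Int) (g : Nat → Int), pvClose m (k + 1).toNat p g →
    pvRed m (k + 1).toNat
      (cs.foldl (fun p c =>
        (PySem.List.pyRange 0 (k + 1) 1).map (fun j =>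
          PySem.Int.mod (PySem.List.pyGetD (p.scanl (· + ·) 0) (j + 1) 0
            - PySem.List.pyGetD (p.scanl (· + ·) 0) (j + 1 - min2 (j + 1) c) 0) m)) p)
      (cs.foldl (fun g c => pvCum (pvMul c.toNat g)) g) := by
  intro cs
  induction cs with
  | nil => intro _ hne; exact absurd rfl hne
  | cons c t ih =>
    intro hall _ p g hclose
    simp only [List.foldl_cons]
    have hrow := rowA_red m k c (hall c List.mem_cons_self) p g hclose
    cases t with
    | nil => exact hrow
    | cons c' t' =>
      exact ih (fun x hx => hall x (List.mem_cons_of_mem c hx)) (by simp) _ _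
        (red_close _ _ _ _ hrow)

-- B's numerator loop stays congruent to the exact Mul fold
lemma Bnum_close (m k : Int) : ∀ (cs : List Int), (∀ c ∈ cs, 0 ≤ c) →
    ∀ (p : List Int) (g : Nat → Int), pvClose m (k + 1).toNat p g →
    pvClose m (k + 1).toNat
      (cs.foldl (fun p c =>
        (PySem.List.pyRange 0 (k + 1) 1).map (fun j =>
          if c ≤ j then
            PySem.Int.mod (PySem.List.pyGetD p j 0 - PySem.List.pyGetD p (j - c) 0) m
          else PySem.List.pyGetD p j 0)) p)
      (cs.foldl (fun g c => pvMul c.toNat g) g) := by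
  intro cs
  induction cs with
  | nil => intro _ p g h; exact h
  | cons c t ih =>
    intro hall p g hclose
    simp only [List.foldl_cons]
    exact ih (fun x hx => hall x (List.mem_cons_of_mem c hx)) _ _
      (mulRow_close m k c (hall c List.mem_cons_self) p g hclose)

-- the shared initial list is exactly pvE0
lemma p0_close (m k : Int) :
    pvClose m (k + 1).toNat ((List.replicate (k + 1).toNat 0).set 0 1) pvE0 := by
  refine ⟨by simp, fun j hj => ?_⟩
  have : ((List.replicate (k + 1).toNat (0 : Int)).set 0 1).getD j 0 = pvE0 j := by
    rw [List.getD_eq_getElem _ 0 (by simpa using hj)]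
    cases j with
    | zero => rw [List.getElem_set_self]; rfl
    | succ j' =>
      rw [List.getElem_set_ne (by omega), List.getElem_replicate]
      rfl
  rw [this]

-- ===== VERDICT (by name: the statement is the Claim_ definition above) =====
theorem groupKnapsackCount_spec : Claim_equal_groupKnapsackCount := by
  intro count k mod _ hpre
  obtain ⟨hk, hrest⟩ := hpre
  unfold Spec_groupKnapsackCount groupKnapsackCount groupKnapsackCount_alt
  rcases hrest with rfl | ⟨hm, hall⟩
  · rfl
  · by_cases hc0 : count = []
    · subst hc0; rfl
    · have hn1 : 1 ≤ count.length := by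
        cases count with
        | nil => exact absurd rfl hc0
        | cons a b => simp
      have hA := Aloop_red mod k count hall hc0 _ pvE0 (p0_close mod k)
      have hBn := Bnum_close mod k count hall _ pvE0 (p0_close mod k)
      have hB := cumIter_red mod k count.length _ _ hn1 hBn
      rw [← exact_identity count pvE0] at hB
      exact red_unique mod (k + 1).toNat _ _ _ hA hB
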